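-- pv_equiv track=rewrite | github.com/JSheare/tgfsearch | tgfsearch/tools.py | separate_data_files
-- ===== SOURCE A (Python) =====
-- def separate_data_files(filelist):
--     """Returns a pair of ordered lists: one with list mode files, the other with trace files."""
--     lm_filetypes = ['.txt', '.txt.gz', '.csv', '.csv.gz']
--     lm_filelist = []
--     trace_filelist = []
--     for file in filelist:
--         if len(file) >= 4:
--             dot_index = len(file) - 4 if file[-3:] == '.gz' else len(file) - 1
--             while file[dot_index] != '.' and dot_index >= 0:
--                 dot_index -= 1
--
--             full_extension = file[dot_index:]
--             if full_extension in lm_filetypes: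
--                 lm_filelist.append(file)
--             else:
--                 trace_filelist.append(file)
--
--     return lm_filelist, trace_filelist
-- ===== SOURCE B (Python) =====
-- def separate_data_files(filelist):
--     """Returns a pair of ordered lists: one with list mode files, the other with trace files."""
--     lm_filetypes = ['.txt', '.txt.gz', '.csv', '.csv.gz']
--     lm_filelist = []
--     trace_filelist = []
--     for file in filelist:
--         if len(file) >= 4:
--             if any(file.endswith(ft) for ft in lm_filetypes):
--                 lm_filelist.append(file)
--             else:
--                 trace_filelist.append(file)
--     return lm_filelist, trace_filelist
-- ===== Notes on version B (the rewrite author's own statement) =====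
-- stated objective: idiomatic
-- what changed: Replaces A's backward character scan for the last dot followed by slicing out the extension and a membership test with a direct any(file.endswith(ft)) suffix test against the four list-mode extensions; same len >= 4 guard, order and return shape.
import Mathlib
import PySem

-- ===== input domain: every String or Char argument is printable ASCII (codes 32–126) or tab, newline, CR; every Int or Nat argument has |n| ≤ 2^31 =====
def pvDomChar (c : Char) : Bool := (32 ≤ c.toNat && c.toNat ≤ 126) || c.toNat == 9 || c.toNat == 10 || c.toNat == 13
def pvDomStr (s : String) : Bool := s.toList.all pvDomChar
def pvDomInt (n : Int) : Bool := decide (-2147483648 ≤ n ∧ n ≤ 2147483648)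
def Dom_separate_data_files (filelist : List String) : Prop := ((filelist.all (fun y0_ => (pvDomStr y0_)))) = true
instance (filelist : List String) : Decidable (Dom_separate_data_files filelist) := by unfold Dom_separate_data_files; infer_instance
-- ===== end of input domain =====

-- B replaces A's backward dot-scan-then-membership classification by a direct endswith test
-- against the four list-mode extensions (idiomatic; same len(file) >= 4 guard, order and return shape).

-- ===== PORT A =====
-- the `while file[dot_index] != '.' and dot_index >= 0` loop; on every reachable call
-- -1 ≤ i < cs.length, so the pyGetD default ' ' is never consulted (the Python never raises here)
def pvFindDot (cs : List Char) (i : Int) : Int :=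
  if PySem.List.pyGetD cs i ' ' ≠ '.' ∧ 0 ≤ i then pvFindDot cs (i - 1) else i
termination_by (i + 1).toNat
decreasing_by omega

def pvLmFiletypes : List (List Char) :=
  [['.','t','x','t'], ['.','t','x','t','.','g','z'], ['.','c','s','v'], ['.','c','s','v','.','g','z']]

def separate_data_files (filelist : List String) : List String × List String :=
  filelist.foldl (fun acc file =>
    let cs := file.toList
    if 4 ≤ cs.length then
      let d0 : Int := if PySem.List.slice cs (some (-3)) none = ['.','g','z'] then (cs.length : Int) - 4 else (cs.length : Int) - 1
      let di := pvFindDot cs d0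
      let ext := PySem.List.slice cs (some di) none
      if ext ∈ pvLmFiletypes then (acc.1 ++ [file], acc.2) else (acc.1, acc.2 ++ [file])
    else acc) ([], [])

-- ===== PORT B =====
def pvLmFiletypesStr : List String := [".txt", ".txt.gz", ".csv", ".csv.gz"]

def separate_data_files_alt (filelist : List String) : List String × List String :=
  filelist.foldl (fun acc file =>
    if 4 ≤ PySem.Str.len file then
      if pvLmFiletypesStr.any (fun ft => PySem.Str.endswith file ft) then (acc.1 ++ [file], acc.2)
      else (acc.1, acc.2 ++ [file])
    else acc) ([], [])

-- ===== PRECONDITION & SPEC =====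
def Spec_separate_data_files (filelist : List String) (out : List String × List String) : Prop := out = separate_data_files_alt filelist
instance (filelist : List String) (out : List String × List String) : Decidable (Spec_separate_data_files filelist out) := by unfold Spec_separate_data_files; infer_instance

-- ===== CLAIM (what is proved, stated in full; the proofs are below) =====
def Claim_equal_separate_data_files : Prop := ∀ (filelist : List String), Dom_separate_data_files filelist → Spec_separate_data_files filelist (separate_data_files filelist)

-- ===== LEMMAS AND PROOFS =====

lemma slice_some_none (cs : List Char) (i : Int) :
    PySem.List.slice cs (some i) none = cs.drop (PySem.List.clampIdx cs.length i) := by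
  show List.take _ _ = _
  apply List.take_of_length_le
  simp

lemma pvFindDot_step (cs : List Char) (i : Int) (h0 : 0 ≤ i)
    (h : PySem.List.pyGetD cs i ' ' ≠ '.') : pvFindDot cs i = pvFindDot cs (i - 1) := by
  rw [pvFindDot]; simp [h, h0]

lemma pvFindDot_stop (cs : List Char) (i : Int)
    (h : PySem.List.pyGetD cs i ' ' = '.') : pvFindDot cs i = i := by
  rw [pvFindDot]; simp [h]

-- character of ys ++ sfx at index ys.length + m
lemma pyGetD_append (ys sfx : List Char) (m : Nat) (_hm : m < sfx.length) :
    PySem.List.pyGetD (ys ++ sfx) ((ys.length : Int) + m) ' ' = sfx.getD m ' ' := by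
  have h : ((ys.length : Int) + m) = ((ys.length + m : Nat) : Int) := by push_cast; ring
  rw [h, PySem.List.pyGetD_natCast]
  simp [List.getD_eq_getElem?_getD, List.getElem?_append_right (Nat.le_add_right ys.length m)]

lemma drop_append_len (ys sfx : List Char) (m : Nat) :
    (ys ++ sfx).drop (ys.length + m) = sfx.drop m := by
  rw [List.drop_append]
  simp

lemma clamp_cast (n k : Nat) (hk : k ≤ n) : PySem.List.clampIdx n (k : Int) = k := by
  unfold PySem.List.clampIdx
  rw [if_neg (by omega)]
  omega

-- A's backward scan, started 3 to the right of the dot, lands on the dot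
lemma scan_suffix (ys sfx : List Char) (h4 : 4 ≤ sfx.length)
    (h0 : sfx.getD 0 ' ' = '.') (h1 : sfx.getD 1 ' ' ≠ '.')
    (h2 : sfx.getD 2 ' ' ≠ '.') (h3 : sfx.getD 3 ' ' ≠ '.') :
    pvFindDot (ys ++ sfx) ((ys.length : Int) + 3) = (ys.length : Int) := by
  have e3 : ((ys.length : Int) + 3) - 1 = (ys.length : Int) + 2 := by ring
  have e2 : ((ys.length : Int) + 2) - 1 = (ys.length : Int) + 1 := by ring
  have e1 : ((ys.length : Int) + 1) - 1 = (ys.length : Int) + 0 := by ring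
  rw [pvFindDot_step _ _ (by positivity) (by rw [show ((3:Int)) = ((3:Nat):Int) from rfl, pyGetD_append ys sfx 3 (by omega)]; exact h3), e3]
  rw [pvFindDot_step _ _ (by positivity) (by rw [show ((2:Int)) = ((2:Nat):Int) from rfl, pyGetD_append ys sfx 2 (by omega)]; exact h2), e2]
  rw [pvFindDot_step _ _ (by positivity) (by rw [show ((1:Int)) = ((1:Nat):Int) from rfl, pyGetD_append ys sfx 1 (by omega)]; exact h1), e1]
  rw [pvFindDot_stop _ _ (by rw [show ((0:Int)) = ((0:Nat):Int) from rfl, pyGetD_append ys sfx 0 (by omega)]; exact h0)]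
  omega

-- `file[-3:]` for cs = ys ++ sfx is the last three chars of sfx
lemma slice_m3 (ys sfx : List Char) (h3l : 3 ≤ sfx.length) :
    PySem.List.slice (ys ++ sfx) (some (-3)) none = sfx.drop (sfx.length - 3) := by
  rw [slice_some_none]
  have hc : PySem.List.clampIdx (ys ++ sfx).length (-3) = ys.length + (sfx.length - 3) := by
    unfold PySem.List.clampIdx
    rw [if_pos (by decide), if_neg (by simp; omega)]
    simp
    omega
  rw [hc, drop_append_len]

lemma len_app (ys s : List Char) (k : Nat) (hk : s.length = k) :
    (((ys ++ s).length : Nat) : Int) = (ys.length : Int) + (k : Int) := by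
  subst hk
  push_cast [List.length_append]
  ring

-- A's full extension of ys ++ sfx is sfx, when the dot sits 3 left of the start index
lemma ext_of (ys sfx : List Char)
    (hd0 : (if PySem.List.slice (ys ++ sfx) (some (-3)) none = ['.','g','z'] then ((ys ++ sfx).length : Int) - 4 else ((ys ++ sfx).length : Int) - 1) = (ys.length : Int) + 3)
    (h4 : 4 ≤ sfx.length)
    (h0 : sfx.getD 0 ' ' = '.') (h1 : sfx.getD 1 ' ' ≠ '.')
    (h2 : sfx.getD 2 ' ' ≠ '.') (h3 : sfx.getD 3 ' ' ≠ '.') :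
    PySem.List.slice (ys ++ sfx)
        (some (pvFindDot (ys ++ sfx)
          (if PySem.List.slice (ys ++ sfx) (some (-3)) none = ['.','g','z'] then ((ys ++ sfx).length : Int) - 4 else ((ys ++ sfx).length : Int) - 1)))
        none = sfx := by
  rw [hd0, scan_suffix ys sfx h4 h0 h1 h2 h3, slice_some_none, clamp_cast _ ys.length (by simp)]
  simp

-- per-file classification equivalence
lemma classify (cs : List Char) (h4 : 4 ≤ cs.length) :
    (PySem.List.slice cs
        (some (pvFindDot cs
          (if PySem.List.slice cs (some (-3)) none = ['.','g','z'] then (cs.length : Int) - 4 else (cs.length : Int) - 1)))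
        none ∈ pvLmFiletypes)
      ↔ (pvLmFiletypesStr.any (fun ft => PySem.Chars.endswith cs ft.toList) = true) := by
  constructor
  · intro hmem
    have hsuf : PySem.List.slice cs
        (some (pvFindDot cs
          (if PySem.List.slice cs (some (-3)) none = ['.','g','z'] then (cs.length : Int) - 4 else (cs.length : Int) - 1)))
        none <:+ cs := by
      rw [slice_some_none]; exact List.drop_suffix _ _
    simp only [pvLmFiletypesStr, List.any_eq_true]
    simp only [pvLmFiletypes, List.mem_cons, List.not_mem_nil, or_false] at hmem
    rcases hmem with h | h | h | h
    · exact ⟨".txt", by simp, (PySem.Chars.endswith_iff _ _).mpr (by rw [show ".txt".toList = ['.','t','x','t'] from rfl, ← h]; exact hsuf)⟩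
    · exact ⟨".txt.gz", by simp, (PySem.Chars.endswith_iff _ _).mpr (by rw [show ".txt.gz".toList = ['.','t','x','t','.','g','z'] from rfl, ← h]; exact hsuf)⟩
    · exact ⟨".csv", by simp, (PySem.Chars.endswith_iff _ _).mpr (by rw [show ".csv".toList = ['.','c','s','v'] from rfl, ← h]; exact hsuf)⟩
    · exact ⟨".csv.gz", by simp, (PySem.Chars.endswith_iff _ _).mpr (by rw [show ".csv.gz".toList = ['.','c','s','v','.','g','z'] from rfl, ← h]; exact hsuf)⟩
  · intro hany
    simp only [pvLmFiletypesStr, List.any_eq_true] at hany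
    obtain ⟨ft, hft, hend⟩ := hany
    simp only [List.mem_cons, List.not_mem_nil, or_false] at hft
    have hsuf : ft.toList <:+ cs := (PySem.Chars.endswith_iff _ _).mp hend
    obtain ⟨ys, rfl⟩ := hsuf
    rcases hft with rfl | rfl | rfl | rfl
    · rw [ext_of ys (".txt".toList)
          (by rw [slice_m3 ys (".txt".toList) (by decide), if_neg (by decide), len_app ys (".txt".toList) 4 rfl]; ring)
          (by decide) (by decide) (by decide) (by decide) (by decide)]
      decide
    · rw [ext_of ys (".txt.gz".toList)
          (by rw [slice_m3 ys (".txt.gz".toList) (by decide), if_pos (by decide), len_app ys (".txt.gz".toList) 7 rfl]; ring)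
          (by decide) (by decide) (by decide) (by decide) (by decide)]
      decide
    · rw [ext_of ys (".csv".toList)
          (by rw [slice_m3 ys (".csv".toList) (by decide), if_neg (by decide), len_app ys (".csv".toList) 4 rfl]; ring)
          (by decide) (by decide) (by decide) (by decide) (by decide)]
      decide
    · rw [ext_of ys (".csv.gz".toList)
          (by rw [slice_m3 ys (".csv.gz".toList) (by decide), if_pos (by decide), len_app ys (".csv.gz".toList) 7 rfl]; ring)
          (by decide) (by decide) (by decide) (by decide) (by decide)]
      decide

lemma step_eq (acc : List String × List String) (file : String) :
    (if 4 ≤ file.toList.length then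
       if PySem.List.slice file.toList
            (some (pvFindDot file.toList
              (if PySem.List.slice file.toList (some (-3)) none = ['.','g','z'] then (file.toList.length : Int) - 4 else (file.toList.length : Int) - 1)))
            none ∈ pvLmFiletypes
       then (acc.1 ++ [file], acc.2) else (acc.1, acc.2 ++ [file])
     else acc)
    = (if 4 ≤ PySem.Str.len file then
        if pvLmFiletypesStr.any (fun ft => PySem.Str.endswith file ft) then (acc.1 ++ [file], acc.2)
        else (acc.1, acc.2 ++ [file])
      else acc) := by
  rw [PySem.Str.len_eq]
  simp only [PySem.Str.endswith_eq]
  by_cases h4 : 4 ≤ file.toList.length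
  · rw [if_pos h4, if_pos (show (4:Int) ≤ (file.toList.length : Int) by exact_mod_cast h4)]
    by_cases hc : (PySem.List.slice file.toList
        (some (pvFindDot file.toList
          (if PySem.List.slice file.toList (some (-3)) none = ['.','g','z'] then (file.toList.length : Int) - 4 else (file.toList.length : Int) - 1)))
        none ∈ pvLmFiletypes)
    · rw [if_pos hc, if_pos ((classify file.toList h4).mp hc)]
    · rw [if_neg hc, if_neg (fun hb => hc ((classify file.toList h4).mpr hb))]
  · rw [if_neg h4, if_neg (show ¬ (4:Int) ≤ (file.toList.length : Int) by exact_mod_cast h4)]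

-- ===== VERDICT (by name: the statement is the Claim_ definition above) =====
theorem separate_data_files_spec : Claim_equal_separate_data_files := by
  intro filelist _
  show separate_data_files filelist = separate_data_files_alt filelist
  unfold separate_data_files separate_data_files_alt
  refine congrArg (fun g => List.foldl g (([], []) : List String × List String) filelist) ?_
  funext acc file
  exact step_eq acc file
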